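-- pv_equiv track=rewrite | github.com/yaranasserr/aws | fastprep/4_GetTotalRequests.py | getTotalRequests
-- ===== SOURCE A (Python) =====
-- from typing import List
--
-- def getTotalRequests(server: List[int], replaced: List[int], new_id: List[int]) -> List[int]:
--     results = []
--     n = len(replaced)
--     count_map = {}
--     for id in server:
--         if id in count_map:
--             count_map[id] += 1
--         else:
--             count_map[id] = 1
--     for day in range(n):
--         to_replace = replaced[day]
--         new_replacement = new_id[day]
--         if to_replace in count_map:
--             count = count_map[to_replace]
--             del count_map[to_replace]
--             if new_replacement in count_map:
--                 count_map[new_replacement] += count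
--             else:
--                 count_map[new_replacement] = count
--         total_requests = 0
--         for id, count in count_map.items():
--             total_requests += id * count
--         results.append(total_requests)
--     return results
-- ===== SOURCE B (Python) =====
-- from typing import List
--
-- def getTotalRequests(server: List[int], replaced: List[int], new_id: List[int]) -> List[int]:
--     count_map = {}
--     for s in server:
--         count_map[s] = count_map.get(s, 0) + 1
--     total = sum(i * c for i, c in count_map.items())
--     results = []
--     for old, new in zip(replaced, new_id):
--         c = count_map.pop(old, 0)
--         if c:
--             count_map[new] = count_map.get(new, 0) + c
--             total += (new - old) * c
--         results.append(total)
--     return results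
-- ===== Notes on version B (the rewrite author's own statement) =====
-- stated objective: faster
-- what changed: B keeps a running weighted total and applies a delta (new-old)*count on each replacement (via dict.pop and zip) instead of re-summing id*count over the whole dict every day.
import Mathlib
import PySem

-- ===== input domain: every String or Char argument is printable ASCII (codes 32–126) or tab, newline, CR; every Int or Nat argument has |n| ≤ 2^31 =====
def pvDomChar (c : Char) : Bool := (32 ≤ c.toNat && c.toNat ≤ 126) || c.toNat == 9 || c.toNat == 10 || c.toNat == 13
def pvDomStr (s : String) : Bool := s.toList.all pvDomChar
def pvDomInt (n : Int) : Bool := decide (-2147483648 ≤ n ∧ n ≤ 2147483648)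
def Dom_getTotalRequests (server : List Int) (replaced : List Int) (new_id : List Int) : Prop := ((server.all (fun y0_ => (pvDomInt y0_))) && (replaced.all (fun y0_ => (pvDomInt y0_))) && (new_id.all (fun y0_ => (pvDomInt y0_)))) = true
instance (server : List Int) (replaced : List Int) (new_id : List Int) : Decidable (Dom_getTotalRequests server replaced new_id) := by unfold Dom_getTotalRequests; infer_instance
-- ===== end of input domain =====

-- B maintains the weighted total incrementally, applying a delta (new-old)*count per replacement
-- instead of re-summing the whole dict each day: O(n+K) instead of O(n*K) (objective: faster).

-- ===== PORT A =====
-- A's counting loop: 'if id in count_map: +=1 else: =1'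
def pvCountA (server : List Int) : PySem.Dict Int Int :=
  server.foldl (fun d id =>
    if d.contains id then d.insert id (d.getD id 0 + 1) else d.insert id 1) PySem.Dict.empty

-- body of A's per-day replacement on the count map
def pvBodyA (cm : PySem.Dict Int Int) (to_replace new_replacement : Int) : PySem.Dict Int Int :=
  if cm.contains to_replace then
    let count := cm.getD to_replace 0
    let cm1 := cm.erase to_replace
    if cm1.contains new_replacement then
      cm1.insert new_replacement (cm1.getD new_replacement 0 + count)
    else
      cm1.insert new_replacement count
  else cm

-- one iteration of A's day loop: replacement, then re-sum id*count over the dict, append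
def pvStepA (st : PySem.Dict Int Int × List Int) (to_replace new_replacement : Int) :
    PySem.Dict Int Int × List Int :=
  let cm := pvBodyA st.1 to_replace new_replacement
  (cm, st.2 ++ [cm.items.foldl (fun acc p => acc + p.1 * p.2) 0])

def getTotalRequests (server : List Int) (replaced : List Int) (new_id : List Int) : List Int :=
  let count_map := pvCountA server
  let n : Int := replaced.length
  -- 'replaced[day]' / 'new_id[day]': pyGetD with default 0 is exact under Pre_ (day is in range for both lists)
  ((PySem.List.pyRange 0 n 1).foldl (fun st day =>
      pvStepA st (PySem.List.pyGetD replaced day 0) (PySem.List.pyGetD new_id day 0))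
    (count_map, [])).2

-- ===== PORT B =====
-- B's counting loop: 'count_map[s] = count_map.get(s, 0) + 1'
def pvCountB (server : List Int) : PySem.Dict Int Int :=
  server.foldl (fun d s => d.insert s (d.getD s 0 + 1)) PySem.Dict.empty

-- one iteration of B's loop: pop(old, 0); if c: move the count and add the delta to the running total
def pvStepB (st : PySem.Dict Int Int × Int × List Int) (old nw : Int) :
    PySem.Dict Int Int × Int × List Int :=
  let cd : Int × PySem.Dict Int Int :=
    match st.1.pop? old with
    | none => (0, st.1)
    | some p => p
  if cd.1 ≠ 0 then
    let d2 := cd.2.insert nw (cd.2.getD nw 0 + cd.1)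
    let total := st.2.1 + (nw - old) * cd.1
    (d2, total, st.2.2 ++ [total])
  else (cd.2, st.2.1, st.2.2 ++ [st.2.1])

def getTotalRequests_alt (server : List Int) (replaced : List Int) (new_id : List Int) : List Int :=
  let count_map := pvCountB server
  let total := (count_map.items.map (fun p => p.1 * p.2)).sum
  ((replaced.zip new_id).foldl (fun st p => pvStepB st p.1 p.2) (count_map, total, [])).2.2

-- ===== PRECONDITION & SPEC =====
-- Pre_ excludes only the inputs where A raises IndexError: 'new_id[day]' with new_id shorter than replaced.
def Pre_getTotalRequests (server : List Int) (replaced : List Int) (new_id : List Int) : Prop :=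
  replaced.length ≤ new_id.length
instance (server : List Int) (replaced : List Int) (new_id : List Int) : Decidable (Pre_getTotalRequests server replaced new_id) := by unfold Pre_getTotalRequests; infer_instance
def pvWitness_getTotalRequests : List Int × List Int × List Int := ([1, 2, 1], [1, 5], [5, 2])

def Spec_getTotalRequests (server : List Int) (replaced : List Int) (new_id : List Int) (out : List Int) : Prop := out = getTotalRequests_alt server replaced new_id
instance (server : List Int) (replaced : List Int) (new_id : List Int) (out : List Int) : Decidable (Spec_getTotalRequests server replaced new_id out) := by unfold Spec_getTotalRequests; infer_instance

-- ===== CLAIM (what is proved, stated in full; the proofs are below) =====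
def Claim_equal_getTotalRequests : Prop := ∀ (server : List Int) (replaced : List Int) (new_id : List Int), Dom_getTotalRequests server replaced new_id → Pre_getTotalRequests server replaced new_id → Spec_getTotalRequests server replaced new_id (getTotalRequests server replaced new_id)

-- ===== LEMMAS AND PROOFS =====

-- weighted sum of an items list
def sumL (l : List (Int × Int)) : Int := (l.map (fun p => p.1 * p.2)).sum

lemma sumL_cons (p : Int × Int) (l : List (Int × Int)) : sumL (p :: l) = p.1 * p.2 + sumL l := by
  simp [sumL]

lemma sumL_filter_ne (k c : Int) : ∀ l : List (Int × Int), (l.map Prod.fst).Nodup → (k, c) ∈ l →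
    sumL (l.filter (fun p => !(p.1 == k))) = sumL l - k * c := by
  intro l
  induction l with
  | nil => intro _ h; cases h
  | cons a t ih =>
    intro hnd hmem
    simp only [List.map_cons, List.nodup_cons] at hnd
    rcases List.mem_cons.mp hmem with h | h
    · -- head is (k, c)
      have hk : a.1 = k := by rw [← h]
      have ht : t.filter (fun p => !(p.1 == k)) = t := by
        apply List.filter_eq_self.mpr
        intro p hp
        have : p.1 ≠ k := by
          intro hc; exact hnd.1 (hk ▸ hc ▸ List.mem_map_of_mem hp)
        simp [this]
      have hcond : (!(a.1 == k)) = false := by simp [hk]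
      rw [List.filter_cons, hcond, if_neg (by simp), ht, ← h, sumL_cons]
      ring
    · -- (k, c) in tail; head key ≠ k by nodup
      have hak : a.1 ≠ k := by
        intro hc
        exact hnd.1 (hc ▸ List.mem_map_of_mem h)
      have hcond : (!(a.1 == k)) = true := by simp [hak]
      rw [List.filter_cons, hcond, if_pos rfl, sumL_cons, sumL_cons, ih hnd.2 h]
      ring

lemma sumL_map_upd (k v c : Int) : ∀ l : List (Int × Int), (l.map Prod.fst).Nodup → (k, c) ∈ l →
    sumL (l.map (fun p => if (p.1 == k) = true then (k, v) else p)) = sumL l - k * c + k * v := by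
  intro l
  induction l with
  | nil => intro _ h; cases h
  | cons a t ih =>
    intro hnd hmem
    simp only [List.map_cons, List.nodup_cons] at hnd
    rcases List.mem_cons.mp hmem with h | h
    · have hk : a.1 = k := by rw [← h]
      have ht : t.map (fun p => if (p.1 == k) = true then (k, v) else p) = t := by
        have : ∀ p ∈ t, (if (p.1 == k) = true then (k, v) else p) = id p := by
          intro p hp
          have : p.1 ≠ k := by
            intro hc; exact hnd.1 (hk ▸ hc ▸ List.mem_map_of_mem hp)
          simp [this]
        rw [List.map_congr_left this, List.map_id]
      have hcond : (a.1 == k) = true := by simp [hk]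
      rw [List.map_cons, hcond, if_pos rfl, ht, sumL_cons, sumL_cons, ← h]
      ring
    · have hak : a.1 ≠ k := by
        intro hc
        exact hnd.1 (hc ▸ List.mem_map_of_mem h)
      have hcond : (a.1 == k) = false := by simp [hak]
      rw [List.map_cons, hcond, if_neg (by simp), sumL_cons, sumL_cons, ih hnd.2 h]
      ring

lemma sumL_erase (d : PySem.Dict Int Int) (k c : Int) (hnd : d.keys.Nodup)
    (hg : d.get? k = some c) : sumL (d.erase k).items = sumL d.items - k * c := by
  have hmem := PySem.Dict.mem_items_of_get?_eq_some d hg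
  exact sumL_filter_ne k c d.items hnd hmem

lemma sumL_insert (d : PySem.Dict Int Int) (k v : Int) (hnd : d.keys.Nodup) :
    sumL (d.insert k v).items = sumL d.items - k * d.getD k 0 + k * v := by
  by_cases h : d.contains k = true
  · have hs : (d.get? k).isSome := by rw [← PySem.Dict.contains_eq_isSome_get?]; exact h
    obtain ⟨c, hc⟩ := Option.isSome_iff_exists.mp hs
    rw [PySem.Dict.items_insert_of_contains d v h,
        sumL_map_upd k v c d.items hnd (PySem.Dict.mem_items_of_get?_eq_some d hc),
        PySem.Dict.getD_of_get?_eq_some d 0 hc]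
  · have h' : d.contains k = false := by simpa using h
    rw [PySem.Dict.items_insert_of_not_contains d v h',
        PySem.Dict.getD_of_not_contains d 0 h']
    simp [sumL]

lemma nodup_keys_erase (d : PySem.Dict Int Int) (k : Int) (hnd : d.keys.Nodup) :
    (d.erase k).keys.Nodup := by
  have : (d.erase k).keys.Sublist d.keys :=
    List.Sublist.map Prod.fst (List.filter_sublist)
  exact this.nodup hnd

lemma mem_values_erase (d : PySem.Dict Int Int) (k v : Int) (h : v ∈ (d.erase k).values) :
    v ∈ d.values := by
  simp only [PySem.Dict.values, PySem.Dict.erase, List.mem_map, List.mem_filter] at h ⊢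
  obtain ⟨p, ⟨hp, _⟩, hv⟩ := h
  exact ⟨p, hp, hv⟩

lemma mem_values_of_get? (d : PySem.Dict Int Int) (k c : Int) (h : d.get? k = some c) :
    c ∈ d.values := by
  have := PySem.Dict.mem_items_of_get?_eq_some d h
  simp only [PySem.Dict.values, List.mem_map]
  exact ⟨(k, c), this, rfl⟩

lemma getD_nonneg_of_pos_values (d : PySem.Dict Int Int) (k : Int)
    (hpos : ∀ v ∈ d.values, 0 < v) : 0 ≤ d.getD k 0 := by
  cases hg : d.get? k with
  | none => rw [PySem.Dict.getD_eq_get?_getD, hg]; simp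
  | some c =>
    rw [PySem.Dict.getD_of_get?_eq_some d 0 hg]
    exact le_of_lt (hpos c (mem_values_of_get? d k c hg))

-- the per-day steps agree: A's dict update equals B's, B's running total stays the dict's weighted sum
lemma step_agree (d : PySem.Dict Int Int) (res : List Int) (old nw : Int)
    (hnd : d.keys.Nodup) (hpos : ∀ v ∈ d.values, 0 < v) :
    pvStepA (d, res) old nw
      = ((pvStepB (d, sumL d.items, res) old nw).1, (pvStepB (d, sumL d.items, res) old nw).2.2)
    ∧ (pvStepB (d, sumL d.items, res) old nw).2.1
        = sumL (pvStepB (d, sumL d.items, res) old nw).1.items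
    ∧ (pvStepB (d, sumL d.items, res) old nw).1.keys.Nodup
    ∧ (∀ v ∈ (pvStepB (d, sumL d.items, res) old nw).1.values, 0 < v) := by
  by_cases h : d.contains old = true
  · -- old present: get its count c
    have hs : (d.get? old).isSome := by rw [← PySem.Dict.contains_eq_isSome_get?]; exact h
    obtain ⟨c, hc⟩ := Option.isSome_iff_exists.mp hs
    have hcpos : 0 < c := hpos c (mem_values_of_get? d old c hc)
    have hcne : c ≠ 0 := ne_of_gt hcpos
    have hBpop : d.pop? old = some (c, d.erase old) := by
      simp [PySem.Dict.pop?, hc]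
    set d1 := d.erase old with hd1
    have hnd1 : d1.keys.Nodup := nodup_keys_erase d old hnd
    have hpos1 : ∀ v ∈ d1.values, 0 < v := fun v hv => hpos v (mem_values_erase d old v hv)
    -- B's step
    have hB : pvStepB (d, sumL d.items, res) old nw
        = (d1.insert nw (d1.getD nw 0 + c),
           sumL d.items + (nw - old) * c,
           res ++ [sumL d.items + (nw - old) * c]) := by
      simp only [pvStepB, hBpop]
      simp [hcne]
    -- A's dict update equals B's
    have hA : pvBodyA d old nw = d1.insert nw (d1.getD nw 0 + c) := by
      simp only [pvBodyA, if_pos h, PySem.Dict.getD_of_get?_eq_some d 0 hc, ← hd1]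
      by_cases h2 : d1.contains nw = true
      · simp [h2]
      · have h2' : d1.contains nw = false := by simpa using h2
        simp [h2', PySem.Dict.getD_of_not_contains d1 0 h2']
    -- the new weighted sum
    have hsum : sumL (d1.insert nw (d1.getD nw 0 + c)).items = sumL d.items + (nw - old) * c := by
      rw [sumL_insert d1 nw (d1.getD nw 0 + c) hnd1, hd1, sumL_erase d old c hnd hc]
      ring
    refine ⟨?_, ?_, ?_, ?_⟩
    · rw [hB]; simp only [pvStepA, hA]
      rw [PySem.List.foldl_add, zero_add]
      have hs' : ((d1.insert nw (d1.getD nw 0 + c)).items.map (fun p => p.1 * p.2)).sum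
          = sumL d.items + (nw - old) * c := hsum
      rw [hs']
    · rw [hB]; simp [hsum]
    · rw [hB]; exact PySem.Dict.nodup_keys_insert d1 nw _ hnd1
    · rw [hB]
      intro v hv
      rcases PySem.Dict.mem_values_insert d1 nw _ v hv with h | h
      · rw [h]
        have := getD_nonneg_of_pos_values d1 nw hpos1
        omega
      · exact hpos1 v h
  · -- old absent: A leaves the dict, B pops nothing
    have h' : d.contains old = false := by simpa using h
    have hg : d.get? old = none := (PySem.Dict.get?_eq_none_iff_contains d old).mpr h'
    have hBpop : d.pop? old = none := by simp [PySem.Dict.pop?, hg]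
    have hB : pvStepB (d, sumL d.items, res) old nw
        = (d, sumL d.items, res ++ [sumL d.items]) := by
      simp [pvStepB, hBpop]
    have hA : pvBodyA d old nw = d := by simp [pvBodyA, h']
    refine ⟨?_, ?_, ?_, ?_⟩
    · rw [hB]; simp only [pvStepA, hA]
      rw [PySem.List.foldl_add, zero_add]
      rfl
    · rw [hB]
    · rw [hB]; exact hnd
    · rw [hB]; exact hpos

-- the whole day loop: A's fold over pairs equals B's, projected to (dict, results)
lemma loop_agree : ∀ (l : List (Int × Int)) (d : PySem.Dict Int Int) (res : List Int),
    d.keys.Nodup → (∀ v ∈ d.values, 0 < v) →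
    l.foldl (fun st p => pvStepA st p.1 p.2) (d, res)
      = ((l.foldl (fun st p => pvStepB st p.1 p.2) (d, sumL d.items, res)).1,
         (l.foldl (fun st p => pvStepB st p.1 p.2) (d, sumL d.items, res)).2.2) := by
  intro l
  induction l with
  | nil => intro d res _ _; simp
  | cons p t ih =>
    intro d res hnd hpos
    obtain ⟨heq, htot, hnd', hpos'⟩ := step_agree d res p.1 p.2 hnd hpos
    simp only [List.foldl_cons]
    rw [heq, ih _ _ hnd' hpos']
    congr 2 <;> rw [← htot]

-- A's index loop over range(len(replaced)) is B's loop over zip(replaced, new_id), given the length bound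
lemma range_zip {σ : Type} (F : σ → Int → Int → σ) : ∀ (xs ys : List Int), xs.length ≤ ys.length →
    ∀ (init : σ),
    (List.range xs.length).foldl (fun s k => F s (xs.getD k 0) (ys.getD k 0)) init
      = (xs.zip ys).foldl (fun s p => F s p.1 p.2) init := by
  intro xs
  induction xs with
  | nil => intro ys _ init; simp
  | cons x xs ih =>
    intro ys hlen init
    cases ys with
    | nil => simp at hlen
    | cons y ys =>
      simp only [List.length_cons]
      rw [List.range_succ_eq_map]
      simp only [List.foldl_cons, List.foldl_map, List.zip_cons_cons, List.getD_cons_zero]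
      have := ih ys (by simpa using hlen) (F init x y)
      simpa [Nat.succ_eq_add_one, List.getD_cons_succ] using this

lemma idx_zip {σ : Type} (F : σ → Int → Int → σ) (xs ys : List Int) (h : xs.length ≤ ys.length)
    (init : σ) :
    (PySem.List.pyRange 0 (xs.length : Int) 1).foldl
        (fun s j => F s (PySem.List.pyGetD xs j 0) (PySem.List.pyGetD ys j 0)) init
      = (xs.zip ys).foldl (fun s p => F s p.1 p.2) init := by
  rw [PySem.List.pyRange_one]
  simp only [List.foldl_map, zero_add, PySem.List.pyGetD_natCast]
  have : ((xs.length : Int) - 0).toNat = xs.length := by omega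
  rw [this]
  exact range_zip F xs ys h init

-- the two counting loops build the same dict
lemma count_loops_eq (server : List Int) : pvCountA server = pvCountB server := by
  unfold pvCountA pvCountB
  apply PySem.List.foldl_congr_mem
  intro d x _
  by_cases h : d.contains x = true
  · simp [h]
  · have h' : d.contains x = false := by simpa using h
    simp [h', PySem.Dict.getD_of_not_contains d 0 h']

lemma counter_values_pos (server : List Int) (v : Int)
    (h : v ∈ (PySem.Dict.counter server).values) : 0 < v := by
  rw [PySem.Dict.values, PySem.Dict.items_counter] at h
  simp only [List.map_map, List.mem_map, Function.comp] at h
  obtain ⟨k, hk, hv⟩ := h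
  have hmem : k ∈ server := (PySem.Set.mem_ofList server k).mp hk
  have : 0 < List.count k server := List.count_pos_iff.mpr hmem
  omega

-- ===== VERDICT (by name: the statement is the Claim_ definition above) =====
theorem getTotalRequests_spec : Claim_equal_getTotalRequests := by
  intro server replaced new_id _ hpre
  unfold Spec_getTotalRequests getTotalRequests getTotalRequests_alt
  dsimp only
  rw [count_loops_eq]
  set cm := pvCountB server with hcm
  have hcounter : cm = PySem.Dict.counter server := by
    rw [hcm]; exact PySem.Dict.foldl_insert_getD_add_one_eq_counter server
  have hnd : cm.keys.Nodup := by rw [hcounter]; exact PySem.Dict.nodup_keys_counter server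
  have hpos : ∀ v ∈ cm.values, 0 < v := by
    rw [hcounter]; exact counter_values_pos server
  rw [idx_zip (fun st t n => pvStepA st t n) replaced new_id hpre]
  have hsum : (cm.items.map (fun p => p.1 * p.2)).sum = sumL cm.items := rfl
  rw [hsum, loop_agree (replaced.zip new_id) cm [] hnd hpos]
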